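-- pv_equiv track=rewrite | github.com/Jagan0606/CSA5120-Cryptography-and-Network-Security | c4 polyalphabetic substitution cipher - Copy.py | try_break
-- ===== SOURCE A (Python) =====
-- def egcd(a,b):
--     if b==0: return (a,1,0)
--     g,x1,y1 = egcd(b, a%b)
--     return (g, y1, x1 - (a//b)*y1)
--
-- def modinv(a,m):
--     g,x,y = egcd(a,m)
--     return x % m if g==1 else None
--
-- def try_break(ciphertext, map1=('B','E'), map2=('U','T')):
--     ct = ''.join(ch.upper() for ch in ciphertext if ch.isalpha())
--     c1 = ord(map1[0]) - 65; p1 = ord(map1[1]) - 65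
--     c2 = ord(map2[0]) - 65; p2 = ord(map2[1]) - 65
--     candidates=[]
--     for a in range(26):
--         if egcd(a,26)[0] != 1: continue
--         b = (c1 - a*p1) % 26
--         if (a*p2 + b) % 26 == c2:
--             # decrypt and show
--             inv = modinv(a,26)
--             pt = ''.join(chr((inv*(ord(ch)-65 - b))%26 + 65) for ch in ct)
--             candidates.append((a,b,pt))
--     return candidates
-- ===== SOURCE B (Python) =====
-- from math import gcd
--
-- def try_break(ciphertext, map1=('B','E'), map2=('U','T')):
--     # Solve the key congruence a*(p2-p1) == c2-c1 (mod 26) algebraically: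
--     # it has either no solution or exactly gcd(p2-p1,26) solutions, which we
--     # enumerate directly instead of scanning all 26 multipliers.
--     ct = ''.join(ch.upper() for ch in ciphertext if ch.isalpha())
--     c1 = ord(map1[0]) - 65; p1 = ord(map1[1]) - 65
--     c2 = ord(map2[0]) - 65; p2 = ord(map2[1]) - 65
--     d = (p2 - p1) % 26
--     r = (c2 - c1) % 26
--     g = gcd(d, 26)
--     candidates = []
--     if r % g == 0:
--         m = 26 // g
--         a0 = (pow(d // g, -1, m) * (r // g)) % m
--         for a in range(a0, 26, m):
--             if gcd(a, 26) != 1: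
--                 continue
--             b = (c1 - a * p1) % 26
--             # b was chosen from the first mapping; verify the key on the second
--             if (a * p2 + b) % 26 != c2:
--                 continue
--             inv = pow(a, -1, 26)
--             pt = ''.join(chr((inv * (ord(ch) - 65 - b)) % 26 + 65) for ch in ct)
--             candidates.append((a, b, pt))
--     return candidates
-- ===== Notes on version B (the rewrite author's own statement) =====
-- stated objective: alternative
-- what changed: B derives the affine multiplier a by solving the linear congruence a*(p2-p1) ≡ c2-c1 (mod 26) algebraically (gcd divisibility test, modular inverse, enumeration of the gcd-many solutions) and verifies each derived key on the second mapping, instead of A's brute-force scan of all 26 multiplier values with a recursive egcd coprimality test on each; Pre_ excludes mapping strings whose length is not 1, on which both programs' ord() raises TypeError.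
import Mathlib
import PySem

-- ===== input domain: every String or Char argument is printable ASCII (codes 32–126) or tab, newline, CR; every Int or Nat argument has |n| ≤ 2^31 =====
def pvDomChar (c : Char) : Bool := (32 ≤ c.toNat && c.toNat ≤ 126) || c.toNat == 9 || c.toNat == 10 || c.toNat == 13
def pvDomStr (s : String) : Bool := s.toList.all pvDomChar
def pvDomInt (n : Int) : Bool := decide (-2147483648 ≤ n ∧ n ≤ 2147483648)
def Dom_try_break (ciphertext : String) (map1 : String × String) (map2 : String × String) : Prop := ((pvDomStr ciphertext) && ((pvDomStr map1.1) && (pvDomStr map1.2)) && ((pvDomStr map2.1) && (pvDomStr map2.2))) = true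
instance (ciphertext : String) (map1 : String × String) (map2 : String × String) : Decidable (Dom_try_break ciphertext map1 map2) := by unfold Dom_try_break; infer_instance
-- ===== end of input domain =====

-- B solves the affine-key linear congruence a*(p2-p1) ≡ c2-c1 (mod 26) algebraically,
-- enumerating only its gcd(p2-p1,26) solutions and verifying each derived key on the
-- second mapping, instead of A's scan over all 26 values of a.

-- ===== PORT A =====
-- egcd with fuel (the fuel only makes the recursion total; b.natAbs+1 steps always suffice)
def egcdF : Nat → Int → Int → Int × Int × Int
  | 0, a, _ => (a, 1, 0)
  | fuel+1, a, b =>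
    if b = 0 then (a, 1, 0)
    else
      let r := egcdF fuel b (PySem.Int.mod a b)
      (r.1, r.2.2, r.2.1 - PySem.Int.floordiv a b * r.2.2)

def egcd (a b : Int) : Int × Int × Int := egcdF (b.natAbs + 1) a b

def modinv (a m : Int) : Option Int :=
  let r := egcd a m
  if r.1 = 1 then some (PySem.Int.mod r.2.1 m) else none

-- ord(s) for a single-character string; other lengths raise TypeError in Python (excluded by Pre_)
def pyOrd (s : String) : Int :=
  match s.toList with
  | [c] => (c.toNat : Int)
  | _ => 0

def try_break (ciphertext : String) (map1 : String × String) (map2 : String × String) : List (Int × Int × String) :=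
  let ct : List Char := (ciphertext.toList.filter PySem.Chars.isalpha).map PySem.Chars.upperChar
  let c1 : Int := pyOrd map1.1 - 65
  let p1 : Int := pyOrd map1.2 - 65
  let c2 : Int := pyOrd map2.1 - 65
  let p2 : Int := pyOrd map2.2 - 65
  (PySem.List.pyRange 0 26 1).foldl (fun candidates a =>
    if (egcd a 26).1 ≠ 1 then candidates
    else
      let b := PySem.Int.mod (c1 - a * p1) 26
      if PySem.Int.mod (a * p2 + b) 26 = c2 then
        -- inv is `some` whenever the guard above holds; .getD 0 is unreachable
        let inv := (modinv a 26).getD 0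
        let pt := String.ofList (ct.map (fun ch => Char.ofNat (PySem.Int.mod (inv * ((ch.toNat : Int) - 65 - b)) 26 + 65).toNat))
        candidates ++ [(a, b, pt)]
      else candidates) []

-- ===== PORT B =====
-- math.gcd on ints (gcd of absolute values), with fuel that only makes the loop total
def pygcdF : Nat → Nat → Nat → Nat
  | 0, x, _ => x
  | fuel+1, x, y => if y = 0 then x else pygcdF fuel y (x % y)

def pygcd (x y : Int) : Int := (pygcdF (y.natAbs + 1) x.natAbs y.natAbs : Int)

-- pow(x, -1, m): iterative extended Euclid keeping only the x-coefficient, then reduce mod m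
def pyInvF : Nat → Int → Int → Int → Int → Int
  | 0, _, _, t0, _ => t0
  | fuel+1, r0, r1, t0, t1 =>
    if r1 = 0 then t0
    else pyInvF fuel r1 (PySem.Int.mod r0 r1) t1 (t0 - PySem.Int.floordiv r0 r1 * t1)

def pyPowNeg1 (x m : Int) : Int := PySem.Int.mod (pyInvF (m.natAbs + x.natAbs + 2) x m 1 0) m

def try_break_alt (ciphertext : String) (map1 : String × String) (map2 : String × String) : List (Int × Int × String) :=
  let ct : List Char := (ciphertext.toList.filter PySem.Chars.isalpha).map PySem.Chars.upperChar
  let c1 : Int := pyOrd map1.1 - 65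
  let p1 : Int := pyOrd map1.2 - 65
  let c2 : Int := pyOrd map2.1 - 65
  let p2 : Int := pyOrd map2.2 - 65
  let d := PySem.Int.mod (p2 - p1) 26
  let r := PySem.Int.mod (c2 - c1) 26
  let g := pygcd d 26
  if PySem.Int.mod r g = 0 then
    let m := PySem.Int.floordiv 26 g
    let a0 := PySem.Int.mod (pyPowNeg1 (PySem.Int.floordiv d g) m * PySem.Int.floordiv r g) m
    (PySem.List.pyRange a0 26 m).foldl (fun candidates a =>
      if pygcd a 26 ≠ 1 then candidates
      else
        let b := PySem.Int.mod (c1 - a * p1) 26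
        if PySem.Int.mod (a * p2 + b) 26 ≠ c2 then candidates
        else
          let inv := pyPowNeg1 a 26
          let pt := String.ofList (ct.map (fun ch => Char.ofNat (PySem.Int.mod (inv * ((ch.toNat : Int) - 65 - b)) 26 + 65).toNat))
          candidates ++ [(a, b, pt)]) []
  else []

-- ===== PRECONDITION & SPEC =====
-- Pre_ excludes exactly the inputs where Python's ord() raises TypeError in both programs: a mapping string whose length is not 1.
def Pre_try_break (ciphertext : String) (map1 : String × String) (map2 : String × String) : Prop :=
  map1.1.length = 1 ∧ map1.2.length = 1 ∧ map2.1.length = 1 ∧ map2.2.length = 1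
instance (ciphertext : String) (map1 : String × String) (map2 : String × String) : Decidable (Pre_try_break ciphertext map1 map2) := by unfold Pre_try_break; infer_instance

def pvWitness_try_break : String × (String × String) × (String × String) := ("AttackAtDawn", ("B", "E"), ("U", "T"))

def Spec_try_break (ciphertext : String) (map1 : String × String) (map2 : String × String) (out : List (Int × Int × String)) : Prop := out = try_break_alt ciphertext map1 map2
instance (ciphertext : String) (map1 : String × String) (map2 : String × String) (out : List (Int × Int × String)) : Decidable (Spec_try_break ciphertext map1 map2 out) := by unfold Spec_try_break; infer_instance

-- ===== CLAIM (what is proved, stated in full; the proofs are below) =====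
def Claim_equal_try_break : Prop := ∀ (ciphertext : String) (map1 : String × String) (map2 : String × String), Dom_try_break ciphertext map1 map2 → Pre_try_break ciphertext map1 map2 → Spec_try_break ciphertext map1 map2 (try_break ciphertext map1 map2)

-- ===== LEMMAS AND PROOFS =====

-- the selected multiplier lists of the two programs, as functions of the four letter indices
def selA (c1 p1 c2 p2 : Int) : List Int :=
  (PySem.List.pyRange 0 26 1).filter (fun a =>
    ((egcd a 26).1 == 1) && (PySem.Int.mod (a * p2 + PySem.Int.mod (c1 - a * p1) 26) 26 == c2))

def selB (c1 p1 c2 p2 a0 m : Int) : List Int :=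
  (PySem.List.pyRange a0 26 m).filter (fun a =>
    (pygcd a 26 == 1) && (PySem.Int.mod (a * p2 + PySem.Int.mod (c1 - a * p1) 26) 26 == c2))

-- the residue-level versions of the two selections
def pvM (d : Int) : Int := PySem.Int.floordiv 26 (pygcd d 26)
def pvA0 (d r : Int) : Int :=
  PySem.Int.mod (pyPowNeg1 (PySem.Int.floordiv d (pygcd d 26)) (pvM d) * PySem.Int.floordiv r (pygcd d 26)) (pvM d)

def selAres (d r : Int) : List Int :=
  (PySem.List.pyRange 0 26 1).filter (fun a =>
    ((egcd a 26).1 == 1) && (PySem.Int.mod (a * d) 26 == r))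

def selBres (d r : Int) : List Int :=
  (PySem.List.pyRange (pvA0 d r) 26 (pvM d)).filter (fun a =>
    (pygcd a 26 == 1) && (PySem.Int.mod (a * d) 26 == r))

-- the common per-candidate payload
def payload (ct : List Char) (c1 p1 : Int) (inv : Int → Int) (a : Int) : Int × Int × String :=
  (a, PySem.Int.mod (c1 - a * p1) 26,
    String.ofList (ct.map (fun ch =>
      Char.ofNat (PySem.Int.mod (inv a * ((ch.toNat : Int) - 65 - PySem.Int.mod (c1 - a * p1) 26)) 26 + 65).toNat)))

lemma A_as_filter (ct : List Char) (c1 p1 c2 p2 : Int) :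
    (PySem.List.pyRange 0 26 1).foldl (fun candidates a =>
      if (egcd a 26).1 ≠ 1 then candidates
      else
        if PySem.Int.mod (a * p2 + PySem.Int.mod (c1 - a * p1) 26) 26 = c2 then
          candidates ++ [(a, PySem.Int.mod (c1 - a * p1) 26,
            String.ofList (ct.map (fun ch =>
              Char.ofNat (PySem.Int.mod ((modinv a 26).getD 0 * ((ch.toNat : Int) - 65 - PySem.Int.mod (c1 - a * p1) 26)) 26 + 65).toNat)))]
        else candidates) []
    = (selA c1 p1 c2 p2).map (payload ct c1 p1 (fun a => (modinv a 26).getD 0)) := by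
  have hbody : (fun (candidates : List (Int × Int × String)) (a : Int) =>
      if (egcd a 26).1 ≠ 1 then candidates
      else
        if PySem.Int.mod (a * p2 + PySem.Int.mod (c1 - a * p1) 26) 26 = c2 then
          candidates ++ [(a, PySem.Int.mod (c1 - a * p1) 26,
            String.ofList (ct.map (fun ch =>
              Char.ofNat (PySem.Int.mod ((modinv a 26).getD 0 * ((ch.toNat : Int) - 65 - PySem.Int.mod (c1 - a * p1) 26)) 26 + 65).toNat)))]
        else candidates)
      = (fun candidates a =>
          if ((egcd a 26).1 == 1) && (PySem.Int.mod (a * p2 + PySem.Int.mod (c1 - a * p1) 26) 26 == c2) then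
            candidates ++ [payload ct c1 p1 (fun a => (modinv a 26).getD 0) a]
          else candidates) := by
    funext acc a
    by_cases h1 : (egcd a 26).1 = 1 <;>
      by_cases h2 : PySem.Int.mod (a * p2 + PySem.Int.mod (c1 - a * p1) 26) 26 = c2 <;>
        simp [h1, h2, payload]
  rw [hbody, PySem.List.foldl_append_if]
  simp [selA]

lemma B_as_filter (ct : List Char) (c1 p1 c2 p2 a0 m : Int) :
    (PySem.List.pyRange a0 26 m).foldl (fun candidates a =>
      if pygcd a 26 ≠ 1 then candidates
      else
        if PySem.Int.mod (a * p2 + PySem.Int.mod (c1 - a * p1) 26) 26 ≠ c2 then candidates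
        else
          candidates ++ [(a, PySem.Int.mod (c1 - a * p1) 26,
            String.ofList (ct.map (fun ch =>
              Char.ofNat (PySem.Int.mod (pyPowNeg1 a 26 * ((ch.toNat : Int) - 65 - PySem.Int.mod (c1 - a * p1) 26)) 26 + 65).toNat)))]) []
    = (selB c1 p1 c2 p2 a0 m).map (payload ct c1 p1 (fun a => pyPowNeg1 a 26)) := by
  have hbody : (fun (candidates : List (Int × Int × String)) (a : Int) =>
      if pygcd a 26 ≠ 1 then candidates
      else
        if PySem.Int.mod (a * p2 + PySem.Int.mod (c1 - a * p1) 26) 26 ≠ c2 then candidates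
        else
          candidates ++ [(a, PySem.Int.mod (c1 - a * p1) 26,
            String.ofList (ct.map (fun ch =>
              Char.ofNat (PySem.Int.mod (pyPowNeg1 a 26 * ((ch.toNat : Int) - 65 - PySem.Int.mod (c1 - a * p1) 26)) 26 + 65).toNat)))])
      = (fun candidates a =>
          if (pygcd a 26 == 1) && (PySem.Int.mod (a * p2 + PySem.Int.mod (c1 - a * p1) 26) 26 == c2) then
            candidates ++ [payload ct c1 p1 (fun a => pyPowNeg1 a 26) a]
          else candidates) := by
    funext acc a
    by_cases h1 : pygcd a 26 = 1 <;>
      by_cases h2 : PySem.Int.mod (a * p2 + PySem.Int.mod (c1 - a * p1) 26) 26 = c2 <;>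
        simp [h1, h2, payload]
  rw [hbody, PySem.List.foldl_append_if]
  simp [selB]

-- the per-multiplier test, rewritten through residues
lemma condA_iff (a c1 p1 c2 p2 : Int) :
    PySem.Int.mod (a * p2 + PySem.Int.mod (c1 - a * p1) 26) 26 = c2 ↔
      (0 ≤ c2 ∧ c2 < 26 ∧
        PySem.Int.mod (a * PySem.Int.mod (p2 - p1) 26) 26 = PySem.Int.mod (c2 - c1) 26) := by
  have e : ∀ x : Int, PySem.Int.mod x 26 = x % 26 := fun x =>
    PySem.Int.mod_eq_emod_of_pos (by norm_num)
  simp only [e]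
  have h1 : a * ((p2 - p1) % 26) % 26 = (a * p2 - a * p1) % 26 := by
    rw [Int.mul_emod, Int.emod_emod_of_dvd _ dvd_rfl, ← Int.mul_emod, mul_sub]
  rw [h1]
  generalize a * p2 = x
  generalize a * p1 = y
  omega

-- the heart: brute-force scan = congruence solving, for all 676 residue pairs
lemma key_sel : ∀ d : Nat, d < 26 → ∀ r : Nat, r < 26 →
    selAres (d : Int) (r : Int)
      = (if PySem.Int.mod (r : Int) (pygcd (d : Int) 26) = 0 then selBres (d : Int) (r : Int) else []) := by
  decide

-- the two inverses agree on every unit of Z/26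
lemma inv_agree : ∀ a : Nat, a < 26 → ((egcd (a : Int) 26).1 == 1) = true →
    (modinv (a : Int) 26).getD 0 = pyPowNeg1 (a : Int) 26 := by
  decide

lemma sel_eq (c1 p1 c2 p2 : Int) :
    selA c1 p1 c2 p2 =
      (if PySem.Int.mod (PySem.Int.mod (c2 - c1) 26) (pygcd (PySem.Int.mod (p2 - p1) 26) 26) = 0 then
        selB c1 p1 c2 p2 (pvA0 (PySem.Int.mod (p2 - p1) 26) (PySem.Int.mod (c2 - c1) 26))
          (pvM (PySem.Int.mod (p2 - p1) 26))
      else []) := by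
  have hD0 : 0 ≤ PySem.Int.mod (p2 - p1) 26 := PySem.Int.mod_nonneg _ (by norm_num)
  have hD1 : PySem.Int.mod (p2 - p1) 26 < 26 := PySem.Int.mod_lt _ (by norm_num)
  have hR0 : 0 ≤ PySem.Int.mod (c2 - c1) 26 := PySem.Int.mod_nonneg _ (by norm_num)
  have hR1 : PySem.Int.mod (c2 - c1) 26 < 26 := PySem.Int.mod_lt _ (by norm_num)
  by_cases h : 0 ≤ c2 ∧ c2 < 26
  · have hA : selA c1 p1 c2 p2 = selAres (PySem.Int.mod (p2 - p1) 26) (PySem.Int.mod (c2 - c1) 26) := by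
      unfold selA selAres
      apply List.filter_congr
      intro a _
      have hb : (PySem.Int.mod (a * p2 + PySem.Int.mod (c1 - a * p1) 26) 26 == c2)
          = (PySem.Int.mod (a * PySem.Int.mod (p2 - p1) 26) 26 == PySem.Int.mod (c2 - c1) 26) := by
        rw [Bool.eq_iff_iff]
        simp only [beq_iff_eq]
        constructor
        · intro h2; exact ((condA_iff a c1 p1 c2 p2).mp h2).2.2
        · intro h2; exact (condA_iff a c1 p1 c2 p2).mpr ⟨h.1, h.2, h2⟩
      rw [hb]
    have hB : selB c1 p1 c2 p2 (pvA0 (PySem.Int.mod (p2 - p1) 26) (PySem.Int.mod (c2 - c1) 26))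
          (pvM (PySem.Int.mod (p2 - p1) 26))
        = selBres (PySem.Int.mod (p2 - p1) 26) (PySem.Int.mod (c2 - c1) 26) := by
      unfold selB selBres
      apply List.filter_congr
      intro a _
      have hb : (PySem.Int.mod (a * p2 + PySem.Int.mod (c1 - a * p1) 26) 26 == c2)
          = (PySem.Int.mod (a * PySem.Int.mod (p2 - p1) 26) 26 == PySem.Int.mod (c2 - c1) 26) := by
        rw [Bool.eq_iff_iff]
        simp only [beq_iff_eq]
        constructor
        · intro h2; exact ((condA_iff a c1 p1 c2 p2).mp h2).2.2
        · intro h2; exact (condA_iff a c1 p1 c2 p2).mpr ⟨h.1, h.2, h2⟩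
      rw [hb]
    rw [hA, hB]
    have ed : (PySem.Int.mod (p2 - p1) 26) = (((PySem.Int.mod (p2 - p1) 26).toNat : Nat) : Int) := by omega
    have er : (PySem.Int.mod (c2 - c1) 26) = (((PySem.Int.mod (c2 - c1) 26).toNat : Nat) : Int) := by omega
    rw [ed, er]
    exact key_sel _ (by omega) _ (by omega)
  · have hA : selA c1 p1 c2 p2 = [] := by
      unfold selA
      apply List.filter_eq_nil_iff.mpr
      intro a _ hc
      simp only [Bool.and_eq_true, beq_iff_eq] at hc
      have := (condA_iff a c1 p1 c2 p2).mp hc.2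
      exact h ⟨this.1, this.2.1⟩
    have hB : selB c1 p1 c2 p2 (pvA0 (PySem.Int.mod (p2 - p1) 26) (PySem.Int.mod (c2 - c1) 26))
          (pvM (PySem.Int.mod (p2 - p1) 26)) = [] := by
      unfold selB
      apply List.filter_eq_nil_iff.mpr
      intro a _ hc
      simp only [Bool.and_eq_true, beq_iff_eq] at hc
      have := (condA_iff a c1 p1 c2 p2).mp hc.2
      exact h ⟨this.1, this.2.1⟩
    rw [hA, hB]
    split <;> rfl

lemma mem_selA (c1 p1 c2 p2 a : Int) (h : a ∈ selA c1 p1 c2 p2) :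
    0 ≤ a ∧ a < 26 ∧ ((egcd a 26).1 == 1) = true := by
  unfold selA at h
  have h1 := List.of_mem_filter h
  have h2 := List.mem_of_mem_filter h
  rw [PySem.List.mem_pyRange_one] at h2
  simp only [Bool.and_eq_true] at h1
  exact ⟨h2.1, h2.2, h1.1⟩

-- ===== VERDICT (by name: the statement is the Claim_ definition above) =====
theorem try_break_spec : Claim_equal_try_break := by
  intro ciphertext map1 map2 _ _
  unfold Spec_try_break
  simp only [try_break, try_break_alt]
  rw [A_as_filter, sel_eq]
  by_cases hg : PySem.Int.mod (PySem.Int.mod (pyOrd map2.1 - 65 - (pyOrd map1.1 - 65)) 26)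
      (pygcd (PySem.Int.mod (pyOrd map2.2 - 65 - (pyOrd map1.2 - 65)) 26) 26) = 0
  · rw [if_pos hg, if_pos hg, B_as_filter]
    apply List.map_congr_left
    intro a ha
    have ha' : a ∈ selA (pyOrd map1.1 - 65) (pyOrd map1.2 - 65) (pyOrd map2.1 - 65) (pyOrd map2.2 - 65) := by
      rw [sel_eq, if_pos hg]
      exact ha
    have hm := mem_selA _ _ _ _ _ ha'
    have hcast : a = ((a.toNat : Nat) : Int) := by omega
    have hi := inv_agree a.toNat (by omega) (by rw [← hcast]; exact hm.2.2)
    rw [← hcast] at hi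
    simp only [payload, hi]
  · rw [if_neg hg, if_neg hg]
    simp
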